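-- pv_equiv track=rewrite | github.com/RunarFosse/leetcode | Hard/find-the-closest-palindrome.py | palindromize
-- ===== SOURCE A (Python) =====
-- def palindromize(num: int, hasOddLength: bool) -> int:
--     # Helper function to palindromize first half of a number
--     palindrome = num
--
--     # Don't duplicate last digit if number
--     # should have odd number of digits
--     if hasOddLength:
--         num //= 10
--
--     while num:
--         palindrome = palindrome * 10 + num % 10
--         num //= 10
--     return palindrome
-- ===== SOURCE B (Python) =====
-- def palindromize(num: int, hasOddLength: bool) -> int:
--     # Mirror the decimal string instead of peeling digits off arithmetically.
--     s = str(num)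
--     half = s[:-1] if hasOddLength else s
--     result = num
--     for c in reversed(half):
--         result = result * 10 + ord(c) - 48
--     return result
-- ===== Notes on version B (the rewrite author's own statement) =====
-- stated objective: idiomatic
-- what changed: B builds the palindrome from the decimal string representation (slice off the last char for odd length, reverse, append char values) instead of extracting digits with repeated %10 and //=10 on a shrinking integer.
-- outside the precondition, e.g. on palindromize(-5, False): A does not finish within the time limit, B returns -453
import Mathlib
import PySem

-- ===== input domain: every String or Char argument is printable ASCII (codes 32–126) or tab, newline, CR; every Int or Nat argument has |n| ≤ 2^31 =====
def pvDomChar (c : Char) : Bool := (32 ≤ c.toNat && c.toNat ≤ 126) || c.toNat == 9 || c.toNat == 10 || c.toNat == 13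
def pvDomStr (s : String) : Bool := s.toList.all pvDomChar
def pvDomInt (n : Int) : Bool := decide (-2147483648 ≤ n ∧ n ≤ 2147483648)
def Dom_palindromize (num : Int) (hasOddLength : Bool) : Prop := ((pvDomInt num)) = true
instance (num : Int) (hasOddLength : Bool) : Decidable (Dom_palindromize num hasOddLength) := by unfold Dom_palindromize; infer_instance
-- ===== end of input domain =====

-- B mirrors the decimal string of num (reversing a slice) instead of peeling digits off with %10 and //=10; same values, no speed claim.

-- ===== PORT A =====
-- 'while num:' of A: for num < 0 the Python loop never terminates (num //= 10 stalls at -1),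
-- so those inputs are outside Pre_; the guard '0 < num' makes the port total and agrees with
-- 'num != 0' on every input Pre_ admits.
def palLoop (num palindrome : Int) : Int :=
  if h : 0 < num then
    palLoop (PySem.Int.floordiv num 10) (palindrome * 10 + PySem.Int.mod num 10)
  else palindrome
termination_by num.toNat
decreasing_by
  rw [PySem.Int.floordiv_eq_ediv_of_pos (by omega : (0:Int) < 10)]
  omega

def palindromize (num : Int) (hasOddLength : Bool) : Int :=
  palLoop (if hasOddLength then PySem.Int.floordiv num 10 else num) num

-- ===== PORT B =====
-- str(num) → PySem.Int.toChars (the char list behind PySem.Int.toStr);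
-- s[:-1] → PySem.Chars.slice s none (some (-1)); ord c → c.toNat (exact on ASCII digits).
def palindromize_alt (num : Int) (hasOddLength : Bool) : Int :=
  let s := PySem.Int.toChars num
  let half := if hasOddLength then PySem.Chars.slice s none (some (-1)) else s
  half.reverse.foldl (fun result c => result * 10 + ((c.toNat : Int) - 48)) num

-- ===== PRECONDITION & SPEC =====
-- Pre_ excludes num < 0, where Python A never returns ('num //= 10' stalls at -1 and 'while num:' loops forever).
def Pre_palindromize (num : Int) (hasOddLength : Bool) : Prop := 0 ≤ num
instance (num : Int) (hasOddLength : Bool) : Decidable (Pre_palindromize num hasOddLength) := by unfold Pre_palindromize; infer_instance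
def pvWitness_palindromize : Int × Bool := (123, true)

def Spec_palindromize (num : Int) (hasOddLength : Bool) (out : Int) : Prop := out = palindromize_alt num hasOddLength
instance (num : Int) (hasOddLength : Bool) (out : Int) : Decidable (Spec_palindromize num hasOddLength out) := by unfold Spec_palindromize; infer_instance

-- ===== CLAIM (what is proved, stated in full; the proofs are below) =====
def Claim_equal_palindromize : Prop := ∀ (num : Int) (hasOddLength : Bool), Dom_palindromize num hasOddLength → Pre_palindromize num hasOddLength → Spec_palindromize num hasOddLength (palindromize num hasOddLength)

-- ===== LEMMAS AND PROOFS =====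

-- Decimal digits of m, least significant first.
def lsbDigits (m : Nat) : List Nat :=
  if h : m = 0 then [] else m % 10 :: lsbDigits (m / 10)
decreasing_by exact Nat.div_lt_self (Nat.pos_of_ne_zero h) (by omega)

lemma lsbDigits_lt (m : Nat) : ∀ d ∈ lsbDigits m, d < 10 := by
  induction m using Nat.strong_induction_on with
  | _ m ih =>
    rw [lsbDigits]
    by_cases h : m = 0
    · simp [h]
    · simp only [h, dite_false, List.mem_cons]
      rintro d (rfl | hd)
      · omega
      · exact ih (m / 10) (Nat.div_lt_self (Nat.pos_of_ne_zero h) (by omega)) d hd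

-- A's loop is the left fold of 'a * 10 + d' over the LSB-first digits.
lemma palLoop_eq (m : Nat) (p : Int) :
    palLoop (m : Int) p = (lsbDigits m).foldl (fun a d => a * 10 + (d : Int)) p := by
  induction m using Nat.strong_induction_on generalizing p with
  | _ m ih =>
    rw [palLoop, lsbDigits]
    by_cases h : m = 0
    · simp [h]
    · have hdiv : PySem.Int.floordiv (m : Int) 10 = ((m / 10 : Nat) : Int) := by
        exact_mod_cast PySem.Int.floordiv_natCast m 10
      have hmod : PySem.Int.mod (m : Int) 10 = ((m % 10 : Nat) : Int) := by
        exact_mod_cast PySem.Int.mod_natCast m 10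
      have hpos : (0 : Int) < (m : Int) := by exact_mod_cast Nat.pos_of_ne_zero h
      rw [dif_pos hpos, hdiv, hmod,
        ih (m / 10) (Nat.div_lt_self (Nat.pos_of_ne_zero h) (by omega))]
      simp [h]

-- Nat.toDigitsCore writes the digits MSB-first (for positive n, with enough fuel).
lemma toDigitsCore_eq : ∀ (fuel n : Nat) (ds : List Char), 0 < n → n < fuel →
    Nat.toDigitsCore 10 fuel n ds = ((lsbDigits n).map Nat.digitChar).reverse ++ ds := by
  intro fuel
  induction fuel with
  | zero => intro n ds hn hlt; omega
  | succ f ih =>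
    intro n ds hn hlt
    rw [Nat.toDigitsCore, lsbDigits]
    simp only [Nat.pos_iff_ne_zero.mp hn, dite_false, List.map_cons, List.reverse_cons]
    by_cases h0 : n / 10 = 0
    · simp [h0, lsbDigits]
    · have hlt' : n / 10 < f := by
        have := Nat.div_lt_self hn (by omega : 1 < 10)
        omega
      rw [if_neg h0, ih (n / 10) _ (Nat.pos_of_ne_zero h0) hlt']
      simp

lemma toDigits_eq (n : Nat) (hn : 0 < n) :
    Nat.toDigits 10 n = ((lsbDigits n).map Nat.digitChar).reverse := by
  rw [Nat.toDigits, toDigitsCore_eq (n + 1) n [] hn (by omega)]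
  simp

lemma digitChar_val (d : Nat) (hd : d < 10) :
    ((Nat.digitChar d).toNat : Int) - 48 = (d : Int) := by
  interval_cases d <;> rfl

-- B's fold over the digit characters equals A's fold over the digit values.
lemma fold_chars_eq (l : List Nat) (hl : ∀ d ∈ l, d < 10) (p : Int) :
    (l.map Nat.digitChar).foldl (fun result c => result * 10 + ((c.toNat : Int) - 48)) p
      = l.foldl (fun a d => a * 10 + (d : Int)) p := by
  induction l generalizing p with
  | nil => rfl
  | cons d t ih =>
    simp only [List.map_cons, List.foldl_cons]
    rw [digitChar_val d (hl d (by simp))]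
    exact ih (fun x hx => hl x (by simp [hx])) _

lemma toChars_natCast (m : Nat) : PySem.Int.toChars (m : Int) = Nat.toDigits 10 m := by
  simp [PySem.Int.toChars]

-- ===== VERDICT (by name: the statement is the Claim_ definition above) =====
theorem palindromize_spec : Claim_equal_palindromize := by
  intro num hasOddLength _ hpre
  obtain ⟨m, rfl⟩ : ∃ m : Nat, num = (m : Int) :=
    ⟨num.toNat, (Int.toNat_of_nonneg hpre).symm⟩
  show palindromize (m : Int) hasOddLength = palindromize_alt (m : Int) hasOddLength
  unfold palindromize palindromize_alt
  simp only [toChars_natCast]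
  cases hasOddLength with
  | false =>
    by_cases h : m = 0
    · subst h
      simp [palLoop, Nat.toDigits, Nat.toDigitsCore]
      decide
    · simp only [Bool.false_eq_true, ite_false]
      rw [toDigits_eq m (Nat.pos_of_ne_zero h), List.reverse_reverse,
        fold_chars_eq _ (lsbDigits_lt m), palLoop_eq]
  | true =>
    have hdiv : PySem.Int.floordiv (m : Int) 10 = ((m / 10 : Nat) : Int) := by
      exact_mod_cast PySem.Int.floordiv_natCast m 10
    simp only [ite_true, hdiv, PySem.Chars.slice_eq_listSlice, PySem.List.slice_to_neg_one]
    by_cases h : m = 0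
    · subst h
      simp [palLoop, Nat.toDigits, Nat.toDigitsCore]
    · rw [toDigits_eq m (Nat.pos_of_ne_zero h)]
      conv_lhs => rw [palLoop_eq]
      conv_rhs => rw [lsbDigits]
      simp only [h, dite_false, List.map_cons, List.reverse_cons, List.dropLast_concat,
        List.reverse_reverse]
      rw [fold_chars_eq _ (fun d hd => lsbDigits_lt (m / 10) d hd)]
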